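-- pv_equiv track=rewrite | github.com/laibamehnaz/GupShup-Codeswitched-Metrics | metrics.py | get_utterance_type
-- ===== SOURCE A (Python) =====
-- def get_utterance_type(code_choice_list):
--     """Returns the type of the utterance given the language tags per token,
--     the utterance can be from one of the following types [English, Hindi, Code-mixed]
--     """
--
--     filtered_list = []  ### example : "thank you ji" --- [english, english, hindi]
--     for code in code_choice_list:
--         if code in ['English', 'Hindi']:
--             filtered_list.append(code)
--     if filtered_list:
--         utt_type = set(filtered_list)
--         if len(utt_type) == 2:
--             return 'code_mixed'
--         return tuple(utt_type)[
--             0]  ### using[0] returns string and not the set - for example : "thank you"---"english[0],english[1]"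
--     return None
-- ===== SOURCE B (Python) =====
-- def get_utterance_type(code_choice_list):
--     # Early-exit single pass over one shared iterator: stop at the first
--     # language tag; the answer then depends only on whether the OTHER tag
--     # occurs among the remaining (unconsumed) elements.
--     it = iter(code_choice_list)
--     for code in it:
--         if code == 'English':
--             return 'code_mixed' if 'Hindi' in it else 'English'
--         if code == 'Hindi':
--             return 'code_mixed' if 'English' in it else 'Hindi'
--     return None
-- ===== Notes on version B (the rewrite author's own statement) =====
-- stated objective: alternative
-- what changed: Replaces A's filter-then-set classification with an early-exit scan over a shared iterator: it stops at the first language tag and only searches the remaining unconsumed elements for the opposite tag; no filtered list or set is built.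
import Mathlib
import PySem

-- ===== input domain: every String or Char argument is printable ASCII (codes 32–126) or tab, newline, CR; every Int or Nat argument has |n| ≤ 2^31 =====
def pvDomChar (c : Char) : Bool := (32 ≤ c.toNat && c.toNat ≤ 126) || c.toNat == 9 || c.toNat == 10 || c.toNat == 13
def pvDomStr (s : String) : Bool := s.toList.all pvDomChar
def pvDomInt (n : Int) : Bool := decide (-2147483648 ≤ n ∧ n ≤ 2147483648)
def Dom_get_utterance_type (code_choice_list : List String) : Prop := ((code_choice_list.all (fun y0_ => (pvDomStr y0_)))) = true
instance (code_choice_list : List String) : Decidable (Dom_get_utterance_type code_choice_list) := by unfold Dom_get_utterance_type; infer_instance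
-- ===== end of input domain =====

-- B replaces A's filter-then-set classification by an early-exit recursion that stops at the
-- first language tag and only searches the remaining suffix for the opposite tag; objective: alternative.

-- ===== PORT A =====
-- loop body of A's 'for code in code_choice_list'
def aStep (acc : List String) (code : String) : List String :=
  if code ∈ ["English", "Hindi"] then acc ++ [code] else acc

def get_utterance_type (code_choice_list : List String) : Option String :=
  let filtered_list : List String := code_choice_list.foldl aStep []
  if filtered_list ≠ [] then
    let utt_type : PySem.Set String := PySem.Set.ofList filtered_list
    if PySem.Set.len utt_type = 2 then some "code_mixed"
    else
      -- tuple(utt_type)[0]: exact here, the set is a singleton in this branch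
      PySem.List.pyGet? utt_type 0
  else none

-- ===== PORT B =====
-- Source B's early-exit recursion: head/rest split; 'x in rest' → rest.contains
def get_utterance_type_alt : List String → Option String
  | [] => none
  | head :: rest =>
    if head == "English" then
      if rest.contains "Hindi" then some "code_mixed" else some "English"
    else if head == "Hindi" then
      if rest.contains "English" then some "code_mixed" else some "Hindi"
    else get_utterance_type_alt rest

-- ===== PRECONDITION & SPEC =====
def Spec_get_utterance_type (code_choice_list : List String) (out : Option String) : Prop := out = get_utterance_type_alt code_choice_list
instance (code_choice_list : List String) (out : Option String) : Decidable (Spec_get_utterance_type code_choice_list out) := by unfold Spec_get_utterance_type; infer_instance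

-- ===== CLAIM (what is proved, stated in full; the proofs are below) =====
def Claim_equal_get_utterance_type : Prop := ∀ (code_choice_list : List String), Dom_get_utterance_type code_choice_list → Spec_get_utterance_type code_choice_list (get_utterance_type code_choice_list)

-- ===== LEMMAS AND PROOFS =====

-- B's early-exit recursion is decided by the two memberships.
theorem alt_char (l : List String) :
    get_utterance_type_alt l =
      if "English" ∈ l then
        (if "Hindi" ∈ l then some "code_mixed" else some "English")
      else if "Hindi" ∈ l then some "Hindi" else none := by
  induction l with
  | nil => simp [get_utterance_type_alt]
  | cons x xs ih =>
    by_cases hx : x = "English"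
    · subst hx; simp [get_utterance_type_alt, List.contains_eq_mem]
    · by_cases hy : x = "Hindi"
      · subst hy; simp [get_utterance_type_alt, List.contains_eq_mem, Ne.symm hx]
      · simp [get_utterance_type_alt, hx, hy, Ne.symm hx, Ne.symm hy, ih]

-- A's fold appends exactly the tagged tokens, in order.
theorem a_fold (l : List String) (acc : List String) :
    l.foldl aStep acc = acc ++ l.filter (fun code => decide (code ∈ ["English", "Hindi"])) := by
  induction l generalizing acc with
  | nil => simp
  | cons x xs ih =>
    rw [List.foldl_cons, ih]
    by_cases hx : x ∈ ["English", "Hindi"] <;> simp [aStep, hx, List.filter_cons] <;>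
      simp at hx <;> tauto

-- A nodup list of strings drawn from {English, Hindi} is one of five lists.
theorem set_cases (s : List String) (hn : s.Nodup)
    (hsub : ∀ x ∈ s, x = "English" ∨ x = "Hindi") :
    s = [] ∨ s = ["English"] ∨ s = ["Hindi"] ∨
      s = ["English", "Hindi"] ∨ s = ["Hindi", "English"] := by
  match s, hn, hsub with
  | [], _, _ => exact Or.inl rfl
  | [a], _, hsub =>
    rcases hsub a (by simp) with h | h <;> simp [h]
  | [a, b], hn, hsub =>
    have hab : a ≠ b := by simp at hn; exact hn
    rcases hsub a (by simp) with ha | ha <;> rcases hsub b (by simp) with hb | hb <;>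
      simp_all
  | a :: b :: c :: t, hn, hsub =>
    exfalso
    have hab : a ≠ b := by simp at hn; tauto
    have hac : a ≠ c := by simp at hn; tauto
    have hbc : b ≠ c := by simp at hn; tauto
    rcases hsub a (by simp) with ha | ha <;>
      rcases hsub b (by simp) with hb | hb <;>
      rcases hsub c (by simp) with hc | hc <;> simp_all

-- ===== VERDICT (by name: the statement is the Claim_ definition above) =====
theorem get_utterance_type_spec : Claim_equal_get_utterance_type := by
  intro l _
  show get_utterance_type l = get_utterance_type_alt l
  rw [alt_char]
  unfold get_utterance_type
  rw [a_fold]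
  simp only [List.nil_append]
  set f := l.filter (fun code => decide (code ∈ ["English", "Hindi"])) with hf
  have hmemf : ∀ x, x ∈ f ↔ (x ∈ l ∧ (x = "English" ∨ x = "Hindi")) := by
    intro x; simp [hf, List.mem_filter]
  set s : List String := PySem.Set.ofList f with hs
  have hsub : ∀ x ∈ s, x = "English" ∨ x = "Hindi" := by
    intro x hx
    rw [hs, PySem.Set.mem_ofList, hmemf] at hx
    exact hx.2
  have hnod : s.Nodup := by rw [hs]; exact PySem.Set.nodup_ofList f
  have hE : ("English" ∈ s) ↔ ("English" ∈ l) := by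
    rw [hs, PySem.Set.mem_ofList, hmemf]; simp
  have hH : ("Hindi" ∈ s) ↔ ("Hindi" ∈ l) := by
    rw [hs, PySem.Set.mem_ofList, hmemf]; simp
  have hfe : f = [] ↔ s = [] := by
    constructor
    · intro h; rw [hs, h]; rfl
    · intro h
      by_contra hne
      obtain ⟨y, hy⟩ := List.exists_mem_of_ne_nil f hne
      have : y ∈ s := by rw [hs, PySem.Set.mem_ofList]; exact hy
      simp [h] at this
  rcases set_cases s hnod hsub with h0 | h1 | h2 | h3 | h4
  · have hfnil : f = [] := hfe.mpr h0
    have he : ¬ ("English" ∈ l) := fun h => by simp [h0] at hE; exact hE h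
    have hh : ¬ ("Hindi" ∈ l) := fun h => by simp [h0] at hH; exact hH h
    simp [hfnil, he, hh]
  · have he : "English" ∈ l := hE.mp (by simp [h1])
    have hh : ¬ ("Hindi" ∈ l) := fun h => by
      have := hH.mpr h; simp [h1] at this
    have hfne : f ≠ [] := fun h => by simp [hfe.mp h] at h1
    simp [hfne, h1, PySem.Set.len, PySem.List.pyGet?, PySem.List.pyIdx?, he, hh]
  · have hh : "Hindi" ∈ l := hH.mp (by simp [h2])
    have he : ¬ ("English" ∈ l) := fun h => by
      have := hE.mpr h; simp [h2] at this
    have hfne : f ≠ [] := fun h => by simp [hfe.mp h] at h2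
    simp [hfne, h2, PySem.Set.len, PySem.List.pyGet?, PySem.List.pyIdx?, he, hh]
  · have he : "English" ∈ l := hE.mp (by simp [h3])
    have hh : "Hindi" ∈ l := hH.mp (by simp [h3])
    have hfne : f ≠ [] := fun h => by simp [hfe.mp h] at h3
    simp [hfne, h3, PySem.Set.len, he, hh]
  · have he : "English" ∈ l := hE.mp (by simp [h4])
    have hh : "Hindi" ∈ l := hH.mp (by simp [h4])
    have hfne : f ≠ [] := fun h => by simp [hfe.mp h] at h4
    simp [hfne, h4, PySem.Set.len, he, hh]
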